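-- pv_equiv track=rewrite | github.com/Eckohaus-Ltd/Formula-to-3D-Prototype-Engine-V1 | engine/analyze_workflow_runs.py | analyze_log_lines
-- ===== SOURCE A (Python) =====
-- from typing import Dict, List, Any
--
-- def analyze_log_lines(logs: str, job_name: str) -> List[str]:
--     """Analyze logs line by line and extract meaningful information."""
--     lines = logs.split('\n')
--     analysis = []
--
--     analysis.append(f"\n#### Log Analysis for: {job_name}")
--     analysis.append(f"Total lines: {len(lines)}\n")
--
--     # Track important patterns
--     errors = []
--     warnings = []
--     important_actions = []
--
--     for i, line in enumerate(lines, 1):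
--         line_lower = line.lower()
--
--         # Detect errors
--         if 'error' in line_lower or 'failed' in line_lower:
--             errors.append(f"Line {i}: {line.strip()}")
--
--         # Detect warnings
--         elif 'warning' in line_lower or 'warn' in line_lower:
--             warnings.append(f"Line {i}: {line.strip()}")
--
--         # Detect important actions (setup, install, build, test, deploy)
--         elif any(keyword in line_lower for keyword in ['setup', 'install', 'build', 'test', 'deploy', 'push', 'commit']):
--             if line.strip() and not line.strip().startswith('#'):
--                 important_actions.append(f"Line {i}: {line.strip()}")
--
--     if errors:
--         analysis.append("**Errors Found:**")
--         analysis.extend(errors[:10])  # Limit to first 10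
--         if len(errors) > 10:
--             analysis.append(f"... and {len(errors) - 10} more errors")
--         analysis.append("")
--
--     if warnings:
--         analysis.append("**Warnings Found:**")
--         analysis.extend(warnings[:10])  # Limit to first 10
--         if len(warnings) > 10:
--             analysis.append(f"... and {len(warnings) - 10} more warnings")
--         analysis.append("")
--
--     if important_actions:
--         analysis.append("**Key Actions Detected:**")
--         analysis.extend(important_actions[:20])  # Limit to first 20
--         if len(important_actions) > 20:
--             analysis.append(f"... and {len(important_actions) - 20} more actions")
--         analysis.append("")
--
--     return analysis
-- ===== SOURCE B (Python) =====
-- KEYWORDS = ('setup', 'install', 'build', 'test', 'deploy', 'push', 'commit')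
--
--
-- def _is_error(line):
--     ll = line.lower()
--     return 'error' in ll or 'failed' in ll
--
--
-- def _is_warning(line):
--     ll = line.lower()
--     return not _is_error(line) and ('warning' in ll or 'warn' in ll)
--
--
-- def _is_action(line):
--     ll = line.lower()
--     s = line.strip()
--     return (not _is_error(line)
--             and not ('warning' in ll or 'warn' in ll)
--             and any(k in ll for k in KEYWORDS)
--             and bool(s) and not s.startswith('#'))
--
--
-- def _section(title, items, limit, noun):
--     if not items:
--         return []
--     out = [title] + items[:limit]
--     if len(items) > limit:
--         out.append(f"... and {len(items) - limit} more {noun}")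
--     out.append("")
--     return out
--
--
-- def analyze_log_lines(logs: str, job_name: str):
--     lines = logs.split('\n')
--     errors = [f"Line {i}: {l.strip()}" for i, l in enumerate(lines, 1) if _is_error(l)]
--     warnings = [f"Line {i}: {l.strip()}" for i, l in enumerate(lines, 1) if _is_warning(l)]
--     actions = [f"Line {i}: {l.strip()}" for i, l in enumerate(lines, 1) if _is_action(l)]
--     return ([f"\n#### Log Analysis for: {job_name}", f"Total lines: {len(lines)}\n"]
--             + _section("**Errors Found:**", errors, 10, "errors")
--             + _section("**Warnings Found:**", warnings, 10, "warnings")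
--             + _section("**Key Actions Detected:**", actions, 20, "actions"))
-- ===== Notes on version B (the rewrite author's own statement) =====
-- stated objective: simpler
-- what changed: A's single loop with a priority elif chain and three mutable accumulators is replaced by three independent filtered passes over enumerate(lines, 1) (one comprehension per category, with explicit not-error/not-warning guards carrying A's elif priority) and a shared _section helper that assembles each output block, replacing A's three copies of the conditional-append logic.
import Mathlib
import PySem

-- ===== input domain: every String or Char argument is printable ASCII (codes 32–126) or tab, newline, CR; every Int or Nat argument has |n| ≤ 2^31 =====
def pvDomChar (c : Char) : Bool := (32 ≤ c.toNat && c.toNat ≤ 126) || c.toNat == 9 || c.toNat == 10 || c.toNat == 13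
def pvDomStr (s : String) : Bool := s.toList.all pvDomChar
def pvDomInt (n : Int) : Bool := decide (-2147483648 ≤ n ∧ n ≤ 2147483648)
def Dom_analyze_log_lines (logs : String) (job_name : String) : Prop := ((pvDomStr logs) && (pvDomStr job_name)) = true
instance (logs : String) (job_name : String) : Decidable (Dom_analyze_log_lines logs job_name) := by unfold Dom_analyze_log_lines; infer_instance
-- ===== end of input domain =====

-- B replaces A's single priority-branching loop by three independent filtered passes over the
-- enumerated lines plus a shared section-assembly helper (objective: simpler decomposition).

-- ===== PORT A =====
-- the elif chain of A's loop, accumulating errors/warnings/important_actions in order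
def pvALoop (i : Int) (ls : List String) (es ws acts : List String) :
    List String × List String × List String :=
  match ls with
  | [] => (es, ws, acts)
  | l :: rest =>
    let ll := PySem.Str.lower l
    if PySem.Str.isIn "error" ll || PySem.Str.isIn "failed" ll then
      pvALoop (i + 1) rest (es ++ ["Line " ++ PySem.Int.toStr i ++ ": " ++ PySem.Str.strip l]) ws acts
    else if PySem.Str.isIn "warning" ll || PySem.Str.isIn "warn" ll then
      pvALoop (i + 1) rest es (ws ++ ["Line " ++ PySem.Int.toStr i ++ ": " ++ PySem.Str.strip l]) acts
    else if ["setup", "install", "build", "test", "deploy", "push", "commit"].any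
        (fun k => PySem.Str.isIn k ll) then
      if PySem.Str.strip l ≠ "" ∧ ¬ (PySem.Str.startswith (PySem.Str.strip l) "#" = true) then
        pvALoop (i + 1) rest es ws (acts ++ ["Line " ++ PySem.Int.toStr i ++ ": " ++ PySem.Str.strip l])
      else
        pvALoop (i + 1) rest es ws acts
    else
      pvALoop (i + 1) rest es ws acts

def analyze_log_lines (logs : String) (job_name : String) : List String :=
  -- logs.split('\n'): the separator is the literal "\n" ≠ "", so split? is always some (exact)
  let lines := (PySem.Str.split? logs "\n").getD []
  let analysis := ["\n#### Log Analysis for: " ++ job_name,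
                   "Total lines: " ++ PySem.Int.toStr (lines.length : Int) ++ "\n"]
  let r := pvALoop 1 lines [] [] []
  let errors := r.1
  let warnings := r.2.1
  let important_actions := r.2.2
  let analysis := if errors ≠ [] then
      analysis ++ ["**Errors Found:**"] ++ errors.take 10 ++   -- errors[:10]
        (if 10 < errors.length then
          ["... and " ++ PySem.Int.toStr ((errors.length : Int) - 10) ++ " more errors"] else []) ++ [""]
    else analysis
  let analysis := if warnings ≠ [] then
      analysis ++ ["**Warnings Found:**"] ++ warnings.take 10 ++   -- warnings[:10]
        (if 10 < warnings.length then
          ["... and " ++ PySem.Int.toStr ((warnings.length : Int) - 10) ++ " more warnings"] else []) ++ [""]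
    else analysis
  let analysis := if important_actions ≠ [] then
      analysis ++ ["**Key Actions Detected:**"] ++ important_actions.take 20 ++   -- [:20]
        (if 20 < important_actions.length then
          ["... and " ++ PySem.Int.toStr ((important_actions.length : Int) - 20) ++ " more actions"] else []) ++ [""]
    else analysis
  analysis

-- ===== PORT B =====
def pvIsError (l : String) : Bool :=
  let ll := PySem.Str.lower l
  PySem.Str.isIn "error" ll || PySem.Str.isIn "failed" ll

def pvIsWarning (l : String) : Bool :=
  let ll := PySem.Str.lower l
  !pvIsError l && (PySem.Str.isIn "warning" ll || PySem.Str.isIn "warn" ll)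

def pvIsAction (l : String) : Bool :=
  let ll := PySem.Str.lower l
  let s := PySem.Str.strip l
  !pvIsError l && !(PySem.Str.isIn "warning" ll || PySem.Str.isIn "warn" ll)
    && ["setup", "install", "build", "test", "deploy", "push", "commit"].any
         (fun k => PySem.Str.isIn k ll)
    && (s ≠ "") && !PySem.Str.startswith s "#"

def pvSection (title : String) (items : List String) (limit : Nat) (noun : String) : List String :=
  if items = [] then []
  else
    [title] ++ items.take limit ++
      (if limit < items.length then
        ["... and " ++ PySem.Int.toStr ((items.length : Int) - (limit : Int)) ++ " more " ++ noun]
       else []) ++ [""]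

def analyze_log_lines_alt (logs : String) (job_name : String) : List String :=
  -- logs.split('\n'): the separator is the literal "\n" ≠ "", so split? is always some (exact)
  let lines := (PySem.Str.split? logs "\n").getD []
  let numbered := PySem.List.enumerate lines 1
  let errors := numbered.filterMap (fun p =>
    if pvIsError p.2 then some ("Line " ++ PySem.Int.toStr p.1 ++ ": " ++ PySem.Str.strip p.2) else none)
  let warnings := numbered.filterMap (fun p =>
    if pvIsWarning p.2 then some ("Line " ++ PySem.Int.toStr p.1 ++ ": " ++ PySem.Str.strip p.2) else none)
  let actions := numbered.filterMap (fun p =>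
    if pvIsAction p.2 then some ("Line " ++ PySem.Int.toStr p.1 ++ ": " ++ PySem.Str.strip p.2) else none)
  ["\n#### Log Analysis for: " ++ job_name,
   "Total lines: " ++ PySem.Int.toStr (lines.length : Int) ++ "\n"]
    ++ pvSection "**Errors Found:**" errors 10 "errors"
    ++ pvSection "**Warnings Found:**" warnings 10 "warnings"
    ++ pvSection "**Key Actions Detected:**" actions 20 "actions"

-- ===== PRECONDITION & SPEC =====
def Spec_analyze_log_lines (logs : String) (job_name : String) (out : List String) : Prop := out = analyze_log_lines_alt logs job_name
instance (logs : String) (job_name : String) (out : List String) : Decidable (Spec_analyze_log_lines logs job_name out) := by unfold Spec_analyze_log_lines; infer_instance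

-- ===== CLAIM (what is proved, stated in full; the proofs are below) =====
def Claim_equal_analyze_log_lines : Prop := ∀ (logs : String) (job_name : String), Dom_analyze_log_lines logs job_name → Spec_analyze_log_lines logs job_name (analyze_log_lines logs job_name)

-- ===== LEMMAS AND PROOFS =====

-- one filtered pass of B, as a named function for the proofs
def pvPass (q : String → Bool) (ls : List String) (i : Int) : List String :=
  (PySem.List.enumerate ls i).filterMap (fun p =>
    if q p.2 then some ("Line " ++ PySem.Int.toStr p.1 ++ ": " ++ PySem.Str.strip p.2) else none)

theorem pvPass_nil (q : String → Bool) (i : Int) : pvPass q [] i = [] := rfl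

theorem pvPass_cons (q : String → Bool) (l : String) (rest : List String) (i : Int) :
    pvPass q (l :: rest) i =
      (if q l then ["Line " ++ PySem.Int.toStr i ++ ": " ++ PySem.Str.strip l] else [])
        ++ pvPass q rest (i + 1) := by
  unfold pvPass
  rw [PySem.List.enumerate_cons]
  cases h : q l <;> simp [h]

-- A's single loop splits into the three filtered passes of B
theorem pvALoop_split (ls : List String) : ∀ (i : Int) (es ws acts : List String),
    pvALoop i ls es ws acts =
      (es ++ pvPass pvIsError ls i, ws ++ pvPass pvIsWarning ls i, acts ++ pvPass pvIsAction ls i) := by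
  induction ls with
  | nil => intro i es ws acts; simp [pvALoop, pvPass_nil]
  | cons l rest ih =>
    intro i es ws acts
    by_cases he : (PySem.Str.isIn "error" (PySem.Str.lower l)
        || PySem.Str.isIn "failed" (PySem.Str.lower l)) = true
    · have tE : pvIsError l = true := he
      have tW : pvIsWarning l = false := by simp only [pvIsWarning]; rw [tE]; rfl
      have tA : pvIsAction l = false := by simp only [pvIsAction]; rw [tE]; rfl
      simp only [pvALoop]
      rw [if_pos he, ih, pvPass_cons, pvPass_cons, pvPass_cons, tE, tW, tA]
      simp [List.append_assoc]
    · have tE : pvIsError l = false := Bool.eq_false_iff.mpr he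
      by_cases hw : (PySem.Str.isIn "warning" (PySem.Str.lower l)
          || PySem.Str.isIn "warn" (PySem.Str.lower l)) = true
      · have tW : pvIsWarning l = true := by simp only [pvIsWarning]; rw [tE, hw]; rfl
        have tA : pvIsAction l = false := by simp only [pvIsAction]; rw [tE, hw]; rfl
        simp only [pvALoop]
        rw [if_neg he, if_pos hw, ih, pvPass_cons, pvPass_cons, pvPass_cons, tE, tW, tA]
        simp [List.append_assoc]
      · have hw0 : (PySem.Str.isIn "warning" (PySem.Str.lower l)
            || PySem.Str.isIn "warn" (PySem.Str.lower l)) = false := Bool.eq_false_iff.mpr hw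
        have tW : pvIsWarning l = false := by simp only [pvIsWarning]; rw [hw0]; simp
        by_cases hk : (["setup", "install", "build", "test", "deploy", "push", "commit"].any
            (fun k => PySem.Str.isIn k (PySem.Str.lower l))) = true
        · by_cases hg : PySem.Str.strip l ≠ "" ∧ ¬ (PySem.Str.startswith (PySem.Str.strip l) "#" = true)
          · have tA : pvIsAction l = true := by
              simp only [pvIsAction]
              rw [tE, hw0, hk, decide_eq_true hg.1, Bool.eq_false_iff.mpr hg.2]
              rfl
            simp only [pvALoop]
            rw [if_neg he, if_neg hw, if_pos hk, if_pos hg, ih,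
              pvPass_cons, pvPass_cons, pvPass_cons, tE, tW, tA]
            simp [List.append_assoc]
          · have tA : pvIsAction l = false := by
              simp only [pvIsAction]
              rw [tE, hw0, hk]
              rcases not_and_or.mp hg with h | h
              · rw [decide_eq_false h]; simp
              · rw [not_not.mp h]; simp
            simp only [pvALoop]
            rw [if_neg he, if_neg hw, if_pos hk, if_neg hg, ih,
              pvPass_cons, pvPass_cons, pvPass_cons, tE, tW, tA]
            simp
        · have tA : pvIsAction l = false := by
            simp only [pvIsAction]
            rw [tE, hw0, Bool.eq_false_iff.mpr hk]
            rfl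
          simp only [pvALoop]
          rw [if_neg he, if_neg hw, if_neg hk, ih,
            pvPass_cons, pvPass_cons, pvPass_cons, tE, tW, tA]
          simp

-- A's conditional-append assembly step is one pvSection block appended to what was built so far
theorem pvSecErr (hdr items : List String) :
    (if items ≠ [] then
      hdr ++ ["**Errors Found:**"] ++ items.take 10 ++
        (if 10 < items.length then
          ["... and " ++ PySem.Int.toStr ((items.length : Int) - 10) ++ " more errors"] else []) ++ [""]
     else hdr) = hdr ++ pvSection "**Errors Found:**" items 10 "errors" := by
  unfold pvSection
  rw [show ∀ x : String, x ++ " more " ++ "errors" = x ++ " more errors" from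
      fun x => by rw [String.append_assoc, show ((" more " : String) ++ "errors") = " more errors" from rfl],
    show (((10 : Nat) : Int)) = (10 : Int) from rfl]
  by_cases h : items = [] <;> simp [h, List.append_assoc]

theorem pvSecWarn (hdr items : List String) :
    (if items ≠ [] then
      hdr ++ ["**Warnings Found:**"] ++ items.take 10 ++
        (if 10 < items.length then
          ["... and " ++ PySem.Int.toStr ((items.length : Int) - 10) ++ " more warnings"] else []) ++ [""]
     else hdr) = hdr ++ pvSection "**Warnings Found:**" items 10 "warnings" := by
  unfold pvSection
  rw [show ∀ x : String, x ++ " more " ++ "warnings" = x ++ " more warnings" from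
      fun x => by rw [String.append_assoc, show ((" more " : String) ++ "warnings") = " more warnings" from rfl],
    show (((10 : Nat) : Int)) = (10 : Int) from rfl]
  by_cases h : items = [] <;> simp [h, List.append_assoc]

theorem pvSecAct (hdr items : List String) :
    (if items ≠ [] then
      hdr ++ ["**Key Actions Detected:**"] ++ items.take 20 ++
        (if 20 < items.length then
          ["... and " ++ PySem.Int.toStr ((items.length : Int) - 20) ++ " more actions"] else []) ++ [""]
     else hdr) = hdr ++ pvSection "**Key Actions Detected:**" items 20 "actions" := by
  unfold pvSection
  rw [show ∀ x : String, x ++ " more " ++ "actions" = x ++ " more actions" from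
      fun x => by rw [String.append_assoc, show ((" more " : String) ++ "actions") = " more actions" from rfl],
    show (((20 : Nat) : Int)) = (20 : Int) from rfl]
  by_cases h : items = [] <;> simp [h, List.append_assoc]

-- ===== VERDICT (by name: the statement is the Claim_ definition above) =====
theorem analyze_log_lines_spec : Claim_equal_analyze_log_lines := by
  intro logs job_name _
  show analyze_log_lines logs job_name = analyze_log_lines_alt logs job_name
  simp only [analyze_log_lines, analyze_log_lines_alt]
  rw [pvALoop_split]
  simp only [List.nil_append]
  rw [pvSecAct, pvSecWarn, pvSecErr]
  simp only [pvPass, List.append_assoc]
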